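-- pv_equiv track=rewrite | github.com/aimin-tang/comp_programming | amazon/string_deviation.py | getMaxFreqDeviation
-- ===== SOURCE A (Python) =====
-- from collections import defaultdict
-- import copy
--
-- def get_count_l(s):
--     curr_d = defaultdict(int)
--     result = [copy.copy(curr_d)]
--
--     for letter in s:
--         curr_d[letter] += 1
--         result.append(copy.copy(curr_d))
--
--     return result
--
-- def get_diff(count_l, start, end):
--     if len(count_l) == 1:
--         return 0
--
--     diff_d = {}
--     start_count, end_count = count_l[start], count_l[end + 1]
--     for letter, count in end_count.items():
--         if letter in start_count:
--             diff_d[letter] = end_count[letter] - start_count[letter]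
--         else:
--             diff_d[letter] = end_count[letter]
--
--     diff_d_copy = {}
--     for letter, count in diff_d.items():
--         if count != 0:
--             diff_d_copy[letter] = count
--
--     result = max(diff_d_copy.values()) - min(diff_d_copy.values())
--     return result
--
-- def getMaxFreqDeviation(s):
--     if len(s) == 1:
--         return 0
--
--     result = 0
--     count_l = get_count_l(s)
--     for start in range(len(s) - 1):
--         for end in range(start + 1, len(s)):
--             diff = get_diff(count_l, start, end)
--             if diff > result:
--                 result = diff
--
--     return result
-- ===== SOURCE B (Python) =====
-- def getMaxFreqDeviation(s):
--     res = 0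
--     for i in range(len(s)):
--         cnt = {}
--         for ch in s[i:]:
--             cnt[ch] = cnt.get(ch, 0) + 1
--             vals = cnt.values()
--             d = max(vals) - min(vals)
--             if d > res:
--                 res = d
--     return res
-- ===== Notes on version B (the rewrite author's own statement) =====
-- stated objective: faster
-- what changed: B drops A's prefix-count snapshot list and per-pair dict subtraction/filter passes: for each start it grows one counter incrementally over the suffix and updates the running max-min deviation directly.
import Mathlib
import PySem

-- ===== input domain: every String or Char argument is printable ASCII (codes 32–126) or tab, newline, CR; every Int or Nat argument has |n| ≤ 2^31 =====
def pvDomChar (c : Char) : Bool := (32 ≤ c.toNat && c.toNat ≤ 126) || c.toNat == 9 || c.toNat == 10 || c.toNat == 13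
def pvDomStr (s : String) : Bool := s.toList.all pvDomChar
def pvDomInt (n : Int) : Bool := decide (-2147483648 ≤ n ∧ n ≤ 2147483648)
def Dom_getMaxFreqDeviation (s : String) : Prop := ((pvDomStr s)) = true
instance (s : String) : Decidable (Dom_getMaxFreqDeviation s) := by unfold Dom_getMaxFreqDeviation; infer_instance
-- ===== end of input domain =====

-- B replaces A's prefix-count snapshots and per-pair dict subtraction/filter passes by one
-- incrementally grown counter per start position (objective: faster by a constant factor).

-- ===== PORT A =====

-- get_count_l: curr_d is a defaultdict(int); curr_d[letter] += 1 is Dict.modify with default 0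
def getCountL (l : List Char) : List (PySem.Dict Char Int) :=
  (l.foldl
    (fun (st : PySem.Dict Char Int × List (PySem.Dict Char Int)) c =>
      let d := st.1.modify c 0 (· + 1)
      (d, st.2 ++ [d]))
    (PySem.Dict.empty, [PySem.Dict.empty])).2

-- get_diff: count_l[start] / count_l[end+1] are always in range at A's call sites, so the
-- total pyGetD/getD 0 defaults are never taken where the Python returns; likewise Python's
-- max()/min() see a nonempty dict there, so the `.getD 0` of max?/min? is never taken.
def getDiff (countL : List (PySem.Dict Char Int)) (start end_ : Int) : Int :=
  if countL.length == 1 then 0 else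
  let startC := PySem.List.pyGetD countL start PySem.Dict.empty
  let endC := PySem.List.pyGetD countL (end_ + 1) PySem.Dict.empty
  let diffD := endC.items.foldl
    (fun (d : PySem.Dict Char Int) p =>
      if startC.contains p.1 then d.insert p.1 (endC.getD p.1 0 - startC.getD p.1 0)
      else d.insert p.1 (endC.getD p.1 0))
    PySem.Dict.empty
  let diffCopy := diffD.items.foldl
    (fun (d : PySem.Dict Char Int) p =>
      if p.2 ≠ 0 then d.insert p.1 p.2 else d)
    PySem.Dict.empty
  (PySem.List.max? diffCopy.values (fun x => x)).getD 0 -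
  (PySem.List.min? diffCopy.values (fun x => x)).getD 0

def getMaxFreqDeviation (s : String) : Int :=
  let l := s.toList
  if l.length == 1 then 0 else
    let countL := getCountL l
    (PySem.List.pyRange 0 ((l.length : Int) - 1) 1).foldl
      (fun res start =>
        (PySem.List.pyRange (start + 1) (l.length : Int) 1).foldl
          (fun res end_ =>
            let diff := getDiff countL start end_
            if diff > res then diff else res)
          res)
      0

-- ===== PORT B =====

-- B: for each start i, one counter grown over the suffix s[i:]; max()/min() of the counter's
-- values are nonempty right after the first insert, so `.getD 0` is never taken.
def getMaxFreqDeviation_alt (s : String) : Int :=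
  let l := s.toList
  (PySem.List.pyRange 0 (l.length : Int) 1).foldl
    (fun res i =>
      ((PySem.List.slice l (some i) none).foldl
        (fun (st : PySem.Dict Char Int × Int) ch =>
          let cnt := st.1.insert ch (st.1.getD ch 0 + 1)
          let vals := cnt.values
          let d := (PySem.List.max? vals (fun x => x)).getD 0 -
                   (PySem.List.min? vals (fun x => x)).getD 0
          (cnt, if d > st.2 then d else st.2))
        (PySem.Dict.empty, res)).2)
    0

-- ===== PRECONDITION & SPEC =====
def Spec_getMaxFreqDeviation (s : String) (out : Int) : Prop := out = getMaxFreqDeviation_alt s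
instance (s : String) (out : Int) : Decidable (Spec_getMaxFreqDeviation s out) := by unfold Spec_getMaxFreqDeviation; infer_instance

-- ===== CLAIM (what is proved, stated in full; the proofs are below) =====
def Claim_equal_getMaxFreqDeviation : Prop := ∀ (s : String), Dom_getMaxFreqDeviation s → Spec_getMaxFreqDeviation s (getMaxFreqDeviation s)

-- ===== LEMMAS AND PROOFS =====

-- max(values) - min(values), as both ports compute it
def maxD (xs : List Int) : Int := (PySem.List.max? xs (fun x => x)).getD 0
def minD (xs : List Int) : Int := (PySem.List.min? xs (fun x => x)).getD 0

-- deviation of a substring t: max - min of the counts of the chars occurring in t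
def devT (t : List Char) : Int :=
  maxD (PySem.Dict.counter t).values - minD (PySem.Dict.counter t).values

lemma max?_ne_none (xs : List Int) (hx : xs ≠ []) :
    ∃ m, PySem.List.max? xs (fun x => x) = some m := by
  cases hm : PySem.List.max? xs (fun x => x) with
  | none => exact absurd ((PySem.List.max?_eq_none_iff xs _).mp hm) hx
  | some m => exact ⟨m, rfl⟩

lemma min?_ne_none (xs : List Int) (hx : xs ≠ []) :
    ∃ m, PySem.List.min? xs (fun x => x) = some m := by
  cases hm : PySem.List.min? xs (fun x => x) with
  | none => exact absurd ((PySem.List.min?_eq_none_iff xs _).mp hm) hx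
  | some m => exact ⟨m, rfl⟩

lemma maxD_congr (xs ys : List Int) (hx : xs ≠ []) (h : ∀ z, z ∈ xs ↔ z ∈ ys) :
    maxD xs = maxD ys := by
  obtain ⟨x0, hx0⟩ := List.exists_mem_of_ne_nil xs hx
  have hy : ys ≠ [] := by
    intro h0
    rw [h0] at h
    exact (List.not_mem_nil ((h x0).mp hx0)).elim
  obtain ⟨m, hm⟩ := max?_ne_none xs hx
  obtain ⟨my, hmy⟩ := max?_ne_none ys hy
  unfold maxD
  rw [hm, hmy]
  simp only [Option.getD_some]
  exact le_antisymm
    (PySem.List.max?_isMax hmy m ((h m).mp (PySem.List.max?_mem hm)))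
    (PySem.List.max?_isMax hm my ((h my).mpr (PySem.List.max?_mem hmy)))

lemma minD_congr (xs ys : List Int) (hx : xs ≠ []) (h : ∀ z, z ∈ xs ↔ z ∈ ys) :
    minD xs = minD ys := by
  obtain ⟨x0, hx0⟩ := List.exists_mem_of_ne_nil xs hx
  have hy : ys ≠ [] := by
    intro h0
    rw [h0] at h
    exact (List.not_mem_nil ((h x0).mp hx0)).elim
  obtain ⟨m, hm⟩ := min?_ne_none xs hx
  obtain ⟨my, hmy⟩ := min?_ne_none ys hy
  unfold minD
  rw [hm, hmy]
  simp only [Option.getD_some]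
  exact le_antisymm
    (PySem.List.min?_isMin hm my ((h my).mpr (PySem.List.min?_mem hmy)))
    (PySem.List.min?_isMin hmy m ((h m).mp (PySem.List.min?_mem hm)))

lemma values_counter (t : List Char) :
    (PySem.Dict.counter t).values = (PySem.Set.ofList t).map (fun c => (t.count c : Int)) := by
  have h := PySem.Dict.items_counter t
  have hv : (PySem.Dict.counter t).values = (PySem.Dict.counter t).items.map (fun p => p.2) := rfl
  rw [hv, h, List.map_map]
  rfl

lemma mem_values_counter (t : List Char) (z : Int) :
    z ∈ (PySem.Dict.counter t).values ↔ ∃ c ∈ t, z = (t.count c : Int) := by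
  rw [values_counter]
  simp only [List.mem_map, PySem.Set.mem_ofList]
  constructor
  · rintro ⟨c, hc, rfl⟩; exact ⟨c, hc, rfl⟩
  · rintro ⟨c, hc, rfl⟩; exact ⟨c, hc, rfl⟩

lemma devT_singleton (c : Char) : devT [c] = 0 := rfl

lemma getCountL_aux (l : List Char) (d0 : PySem.Dict Char Int) (acc : List (PySem.Dict Char Int)) :
    l.foldl (fun (st : PySem.Dict Char Int × List (PySem.Dict Char Int)) c =>
        let d := st.1.modify c 0 (· + 1)
        (d, st.2 ++ [d])) (d0, acc)
    = (l.foldl (fun d x => d.modify x 0 (· + 1)) d0,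
       acc ++ (List.range l.length).map
         (fun i => (l.take (i + 1)).foldl (fun d x => d.modify x 0 (· + 1)) d0)) := by
  induction l generalizing d0 acc with
  | nil => simp
  | cons c t ih =>
      rw [List.foldl_cons, List.foldl_cons]
      refine (ih _ _).trans ?_
      refine Prod.ext rfl ?_
      simp only [List.length_cons, List.range_succ_eq_map, List.map_cons, List.map_map,
        List.take_succ_cons, List.foldl_cons, List.take_zero, List.foldl_nil,
        List.append_assoc, List.singleton_append]
      rfl

lemma getCountL_eq (l : List Char) :
    getCountL l = (List.range (l.length + 1)).map (fun i => PySem.Dict.counter (l.take i)) := by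
  unfold getCountL
  rw [getCountL_aux]
  simp only [← PySem.Dict.counter_eq_foldl, List.range_succ_eq_map, List.map_cons,
    List.map_map, List.take_zero]
  rfl

lemma values_eq_items (d : PySem.Dict Char Int) :
    d.values = d.items.map (fun p => p.2) := rfl

lemma getDiff_eq (l : List Char) (s e : Nat) (hse : s < e) (he : e < l.length) :
    getDiff (getCountL l) (s : Int) (e : Int) = devT ((l.drop s).take (e + 1 - s)) := by
  have harith : s + (e + 1 - s) = e + 1 := by omega
  set t := (l.drop s).take (e + 1 - s) with ht
  have hsplit : l.take (e + 1) = l.take s ++ t := by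
    conv_lhs => rw [← harith]
    rw [List.take_add]
  have htne : t ≠ [] := by
    have hlen : t.length = min (e + 1 - s) (l.length - s) := by
      rw [ht]; simp [List.length_take, List.length_drop]
    intro h0
    rw [h0] at hlen
    simp only [List.length_nil] at hlen
    omega
  have hcount : ∀ c : Char, ((l.take (e + 1)).count c : Int)
      = ((l.take s).count c : Int) + (t.count c : Int) := by
    intro c; rw [hsplit, List.count_append]; push_cast; ring
  have hcond : (l.length + 1 == 1) = false := by
    simp only [beq_eq_false_iff_ne, ne_eq]; omega
  simp only [getDiff, getCountL_eq, List.length_map, List.length_range, hcond,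
    Bool.false_eq_true, if_false,
    show (e : Int) + 1 = ((e + 1 : Nat) : Int) from by push_cast; ring,
    PySem.List.pyGetD_natCast, List.getD_eq_getElem?_getD, List.getElem?_map,
    List.getElem?_range, show s < l.length + 1 from by omega,
    show e + 1 < l.length + 1 from by omega, Option.map_some, Option.getD_some,
    PySem.Dict.items_counter]
  -- uniformize the first fold's step
  rw [PySem.List.foldl_congr_mem
    ((PySem.Set.ofList (l.take (e + 1))).map (fun k => (k, ((l.take (e + 1)).count k : Int))))
    _ (fun (d : PySem.Dict Char Int) (p : Char × Int) => d.insert p.1 ((t.count p.1 : Int)))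
    PySem.Dict.empty ?hstep]
  case hstep =>
    intro acc p hp
    rw [List.mem_map] at hp
    obtain ⟨c, hc, rfl⟩ := hp
    by_cases hcc : (PySem.Dict.counter (l.take s)).contains c = true
    · simp only [hcc, if_true, PySem.Dict.getD_counter]
      rw [show ((l.take (e + 1)).count c : Int) - ((l.take s).count c : Int)
        = ((t.count c : Int)) from by rw [hcount]; ring]
    · simp only [hcc, Bool.false_eq_true, if_false, PySem.Dict.getD_counter]
      have hns : c ∉ l.take s := by
        rw [PySem.Dict.contains_counter] at hcc
        simpa using hcc
      have hz : (l.take s).count c = 0 := List.count_eq_zero.mpr hns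
      rw [show ((l.take (e + 1)).count c : Int) = ((t.count c : Int)) from by
        rw [hcount, hz]; push_cast; ring]
  rw [PySem.Dict.items_foldl_insert_fresh _ (fun p : Char × Int => p.1)
    (fun p : Char × Int => ((t.count p.1 : Int))) PySem.Dict.empty ?fresh1 ?nodup1]
  case fresh1 => intro a _; exact PySem.Dict.contains_empty _
  case nodup1 =>
    simp only [List.map_map, Function.comp_def, List.map_id']
    exact PySem.Set.nodup_ofList _
  simp only [show (PySem.Dict.empty : PySem.Dict Char Int).items = [] from rfl,
    List.nil_append, List.map_map, Function.comp_def]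
  rw [PySem.List.foldl_ite_eq_foldl_filter (fun p : Char × Int => p.2 ≠ 0)
    (fun (d : PySem.Dict Char Int) p => d.insert p.1 p.2) _ PySem.Dict.empty]
  rw [List.filter_map]
  simp only [values_eq_items]
  rw [PySem.Dict.items_foldl_insert_fresh _ (fun p : Char × Int => p.1)
    (fun p : Char × Int => p.2) PySem.Dict.empty ?fresh2 ?nodup2]
  case fresh2 => intro a _; exact PySem.Dict.contains_empty _
  case nodup2 =>
    simp only [List.map_map, Function.comp_def, List.map_id']
    exact (PySem.Set.nodup_ofList _).filter _
  simp only [show (PySem.Dict.empty : PySem.Dict Char Int).items = [] from rfl,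
    List.nil_append, List.map_map, Function.comp_def]
  have hmem : ∀ z : Int,
      z ∈ (List.filter (fun x => decide ((List.count x t : Int) ≠ 0))
            (PySem.Set.ofList (l.take (e + 1)))).map (fun x => (List.count x t : Int))
        ↔ z ∈ (PySem.Dict.counter t).values := by
    intro z
    rw [mem_values_counter]
    simp only [List.mem_map, List.mem_filter, PySem.Set.mem_ofList, decide_eq_true_eq]
    constructor
    · rintro ⟨c, ⟨hcpe, hcnz⟩, rfl⟩
      have h0 : t.count c ≠ 0 := by exact_mod_cast hcnz
      exact ⟨c, List.count_pos_iff.mp (Nat.pos_of_ne_zero h0), rfl⟩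
    · rintro ⟨c, hct, rfl⟩
      refine ⟨c, ⟨?_, ?_⟩, rfl⟩
      · rw [hsplit]; exact List.mem_append_right _ hct
      · have h1 : 0 < t.count c := List.count_pos_iff.mpr hct
        exact_mod_cast Nat.pos_iff_ne_zero.mp h1
  have hne : (List.filter (fun x => decide ((List.count x t : Int) ≠ 0))
      (PySem.Set.ofList (l.take (e + 1)))).map (fun x => (List.count x t : Int)) ≠ [] := by
    obtain ⟨c0, hc0⟩ := List.exists_mem_of_ne_nil t htne
    apply List.ne_nil_of_mem (a := (List.count c0 t : Int))
    apply List.mem_map.mpr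
    refine ⟨c0, List.mem_filter.mpr ⟨?_, ?_⟩, rfl⟩
    · exact (PySem.Set.mem_ofList _ _).mpr (by rw [hsplit]; exact List.mem_append_right _ hc0)
    · simp only [decide_eq_true_eq]
      have h1 : 0 < t.count c0 := List.count_pos_iff.mpr hc0
      exact_mod_cast Nat.pos_iff_ne_zero.mp h1
  show maxD ((List.filter (fun x => decide ((List.count x t : Int) ≠ 0))
        (PySem.Set.ofList (l.take (e + 1)))).map (fun x => (List.count x t : Int)))
      - minD ((List.filter (fun x => decide ((List.count x t : Int) ≠ 0))
        (PySem.Set.ofList (l.take (e + 1)))).map (fun x => (List.count x t : Int))) = devT t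
  rw [maxD_congr _ _ hne hmem, minD_congr _ _ hne hmem]
  rfl

-- the nested running-max loops are a foldl max over the flattened value list
lemma foldl_max_flatten {α β : Type} (I : List α) (J : α → List β) (f : α → β → Int) (r0 : Int) :
    I.foldl (fun r i => (J i).foldl (fun r j => max r (f i j)) r) r0
      = (I.flatMap (fun i => (J i).map (f i))).foldl max r0 := by
  induction I generalizing r0 with
  | nil => rfl
  | cons a I ih =>
      rw [List.foldl_cons, List.flatMap_cons, List.foldl_append, ih, List.foldl_map]

lemma if_gt_eq_max (r d : Int) : (if d > r then d else r) = max r d := by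
  rw [max_def]; split <;> split <;> omega

lemma foldl_max_eq (LA LB : List Int)
    (hA : ∀ x ∈ LA, x ∈ LB ∨ x ≤ 0) (hB : ∀ x ∈ LB, x ∈ LA ∨ x ≤ 0) :
    LA.foldl max 0 = LB.foldl max 0 := by
  apply le_antisymm
  · rcases PySem.List.foldl_max_mem LA 0 with h0 | hmem
    · rw [h0]; exact (PySem.List.le_foldl_max LB 0).1
    · rcases hA _ hmem with hin | hle
      · exact (PySem.List.le_foldl_max LB 0).2 _ hin
      · exact le_trans hle (PySem.List.le_foldl_max LB 0).1
  · rcases PySem.List.foldl_max_mem LB 0 with h0 | hmem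
    · rw [h0]; exact (PySem.List.le_foldl_max LA 0).1
    · rcases hB _ hmem with hin | hle
      · exact (PySem.List.le_foldl_max LA 0).2 _ hin
      · exact le_trans hle (PySem.List.le_foldl_max LA 0).1

def listA (l : List Char) : List Int :=
  (List.range (l.length - 1)).flatMap
    (fun i => (List.range (l.length - 1 - i)).map (fun k => devT ((l.drop i).take (k + 2))))

def listB (l : List Char) : List Int :=
  (List.range l.length).flatMap
    (fun i => (List.range (l.length - i)).map (fun k => devT ((l.drop i).take (k + 1))))

lemma counter_insert_snoc (u : List Char) (c : Char) :
    (PySem.Dict.counter u).insert c ((PySem.Dict.counter u).getD c 0 + 1)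
      = PySem.Dict.counter (u ++ [c]) := by
  rw [← PySem.Dict.foldl_insert_getD_add_one_eq_counter u,
      ← PySem.Dict.foldl_insert_getD_add_one_eq_counter (u ++ [c]), List.foldl_append]
  rfl

lemma devT_eq (t : List Char) :
    (PySem.List.max? (PySem.Dict.counter t).values (fun x => x)).getD 0 -
      (PySem.List.min? (PySem.Dict.counter t).values (fun x => x)).getD 0 = devT t := rfl

lemma B_inner (t u : List Char) (r : Int) :
    (t.foldl
      (fun (st : PySem.Dict Char Int × Int) ch =>
        let cnt := st.1.insert ch (st.1.getD ch 0 + 1)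
        let vals := cnt.values
        let d := (PySem.List.max? vals (fun x => x)).getD 0 -
                 (PySem.List.min? vals (fun x => x)).getD 0
        (cnt, if d > st.2 then d else st.2))
      (PySem.Dict.counter u, r)).2
    = (List.range t.length).foldl
        (fun r k => max r (devT (u ++ t.take (k + 1)))) r := by
  induction t generalizing u r with
  | nil => rfl
  | cons c t ih =>
      rw [List.foldl_cons]
      simp only [counter_insert_snoc]
      rw [ih (u ++ [c])]
      rw [if_gt_eq_max, devT_eq]
      simp only [List.length_cons, List.range_succ_eq_map, List.foldl_cons, List.foldl_map,
        List.take_succ_cons, List.take_zero]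
      refine PySem.List.foldl_congr_mem _ _ _ _ ?_
      intro acc k _
      rw [show u ++ c :: t.take (k + 1) = (u ++ [c]) ++ t.take (k + 1) by simp]

lemma B_eq (s : String) : getMaxFreqDeviation_alt s = (listB s.toList).foldl max 0 := by
  simp only [getMaxFreqDeviation_alt, listB, PySem.List.pyRange_one, sub_zero,
    Int.toNat_natCast, List.foldl_map, zero_add, PySem.List.slice_from_natCast]
  rw [show (PySem.Dict.empty : PySem.Dict Char Int) = PySem.Dict.counter [] from rfl]
  simp only [B_inner, List.nil_append, List.length_drop]
  rw [foldl_max_flatten (List.range s.toList.length) (fun i => List.range (s.toList.length - i))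
    (fun i k => devT ((s.toList.drop i).take (k + 1))) 0]

lemma A_eq (s : String) (h : s.toList.length ≠ 1) :
    getMaxFreqDeviation s = (listA s.toList).foldl max 0 := by
  have hbeq : (s.toList.length == 1) = false := by simpa using h
  simp only [getMaxFreqDeviation, listA, hbeq, Bool.false_eq_true, if_false,
    PySem.List.pyRange_one, List.foldl_map, zero_add, sub_zero]
  rw [show ((s.toList.length : Int) - 1).toNat = s.toList.length - 1 from by omega]
  refine Eq.trans (PySem.List.foldl_congr_mem _ _
    (fun res i => (List.range (s.toList.length - 1 - i)).foldl
      (fun r k => max r (devT ((s.toList.drop i).take (k + 2)))) res) 0 ?_) ?_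
  · intro acc i hi
    rw [List.mem_range] at hi
    rw [show ((s.toList.length : Int) - ((i : Int) + 1)).toNat = s.toList.length - 1 - i from by omega]
    refine PySem.List.foldl_congr_mem _ _ _ acc ?_
    intro acc2 k hk
    rw [List.mem_range] at hk
    show (if getDiff (getCountL s.toList) (i : Int) ((i : Int) + 1 + (k : Int)) > acc2
          then getDiff (getCountL s.toList) (i : Int) ((i : Int) + 1 + (k : Int)) else acc2) = _
    rw [if_gt_eq_max, show (i : Int) + 1 + (k : Int) = ((i + 1 + k : Nat) : Int) from by push_cast; ring,
      getDiff_eq s.toList i (i + 1 + k) (by omega) (by omega),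
      show i + 1 + k + 1 - i = k + 2 from by omega]
  · rw [foldl_max_flatten (List.range (s.toList.length - 1))
      (fun i => List.range (s.toList.length - 1 - i))
      (fun i k => devT ((s.toList.drop i).take (k + 2))) 0]

lemma devT_take_one (l : List Char) (i : Nat) (hi : i < l.length) :
    devT ((l.drop i).take 1) = 0 := by
  rw [← List.getElem_cons_drop hi]
  exact devT_singleton _

lemma main_eq (s : String) : getMaxFreqDeviation s = getMaxFreqDeviation_alt s := by
  rw [B_eq]
  by_cases h1 : s.toList.length = 1
  · have hbeq : (s.toList.length == 1) = true := by simpa using h1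
    simp only [getMaxFreqDeviation, hbeq, if_true]
    refine Eq.trans (by rfl) (foldl_max_eq [] (listB s.toList) (by intro x hx; cases hx) ?_)
    intro x hx
    right
    unfold listB at hx
    simp only [List.mem_flatMap, List.mem_map, List.mem_range] at hx
    obtain ⟨i, hi, k, hk, rfl⟩ := hx
    have hk0 : k = 0 := by omega
    subst hk0
    rw [devT_take_one s.toList i (by omega)]
  · rw [A_eq s h1]
    apply foldl_max_eq
    · intro x hx
      left
      unfold listA at hx
      unfold listB
      simp only [List.mem_flatMap, List.mem_map, List.mem_range] at hx ⊢
      obtain ⟨i, hi, k, hk, rfl⟩ := hx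
      exact ⟨i, by omega, ⟨k + 1, by omega, rfl⟩⟩
    · intro x hx
      unfold listB at hx
      unfold listA
      simp only [List.mem_flatMap, List.mem_map, List.mem_range] at hx ⊢
      obtain ⟨i, hi, k, hk, rfl⟩ := hx
      cases k with
      | zero => right; rw [devT_take_one s.toList i hi]
      | succ k => left; exact ⟨i, by omega, ⟨k, by omega, rfl⟩⟩

-- ===== VERDICT (by name: the statement is the Claim_ definition above) =====
theorem getMaxFreqDeviation_spec : Claim_equal_getMaxFreqDeviation := by
  intro s _
  unfold Spec_getMaxFreqDeviation
  exact main_eq s
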